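-- pv_equiv track=rewrite | github.com/uds-lsv/noise-matrix-ner | code/ner_datacode.py | convert_io_to_bio_labels
-- ===== SOURCE A (Python) =====
-- def convert_io_to_bio_labels(old_labels):
--     """ Converts a list of IO labels (e.g. ["O", "ORG", "PER", "PER"])
--         to BIO labels (["O", "B-ORG", "B-PER", "I-PER"]). IO labels contain
--         less information than BIO labels, so adjacent entities might
--         be joined (which is however very rare in practice).
--     """
--     outside_token = "O"
--
--     new_labels = []
--     for i, label in enumerate(old_labels):
--         if label == outside_token:
--             new_labels.append(outside_token)
--         else:
--             if i > 0 and old_labels[i-1] == label: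
--                 new_labels.append("I-" + label)
--             else:
--                 new_labels.append("B-" + label)
--     return new_labels
-- ===== SOURCE B (Python) =====
-- def convert_io_to_bio_labels(old_labels):
--     """Run-based rewrite: split the list into maximal runs of equal labels,
--     emit 'O'*run for an 'O' run and 'B-'+label followed by 'I-'+label
--     repeats for an entity run."""
--     new_labels = []
--     i = 0
--     n = len(old_labels)
--     while i < n:
--         label = old_labels[i]
--         j = i
--         while j < n and old_labels[j] == label:
--             j += 1
--         run = j - i
--         if label == "O":
--             new_labels.extend(["O"] * run)
--         else:
--             new_labels.append("B-" + label)
--             new_labels.extend(["I-" + label] * (run - 1))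
--         i = j
--     return new_labels
-- ===== Notes on version B (the rewrite author's own statement) =====
-- stated objective: alternative
-- what changed: B splits the input into maximal runs of equal labels and emits a whole run at once (O-run as repeated O, entity run as B- head plus I- repeats), instead of A's per-element scan that re-reads the predecessor via indexing.
import Mathlib
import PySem

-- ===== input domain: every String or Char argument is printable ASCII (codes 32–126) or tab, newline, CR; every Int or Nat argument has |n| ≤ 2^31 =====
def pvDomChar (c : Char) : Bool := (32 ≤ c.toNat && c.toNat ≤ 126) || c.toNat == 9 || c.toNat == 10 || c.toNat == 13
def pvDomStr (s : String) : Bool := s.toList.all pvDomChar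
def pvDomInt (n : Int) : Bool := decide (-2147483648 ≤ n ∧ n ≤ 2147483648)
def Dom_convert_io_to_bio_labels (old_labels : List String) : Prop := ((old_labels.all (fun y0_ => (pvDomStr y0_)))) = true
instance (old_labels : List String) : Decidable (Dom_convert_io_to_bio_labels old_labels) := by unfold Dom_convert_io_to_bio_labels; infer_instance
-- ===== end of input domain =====

-- B rewrites the per-element scan as a run-based emission (alternative decomposition, same cost).

-- ===== PORT A =====
def convert_io_to_bio_labels (old_labels : List String) : List String :=
  (PySem.List.enumerate old_labels 0).foldl
    (fun new_labels il =>
      let i := il.1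
      let label := il.2
      if label = "O" then new_labels ++ ["O"]
      else if 0 < i ∧ PySem.List.pyGet? old_labels (i - 1) = some label then
        new_labels ++ ["I-" ++ label]
      else new_labels ++ ["B-" ++ label]) []

-- ===== PORT B =====
def convert_io_to_bio_labels_alt : List String → List String
  | [] => []
  | x :: xs =>
    let run := xs.takeWhile (fun y => y = x)
    (if x = "O" then List.replicate (run.length + 1) "O"
     else ("B-" ++ x) :: List.replicate run.length ("I-" ++ x))
      ++ convert_io_to_bio_labels_alt (xs.dropWhile (fun y => y = x))
termination_by ls => ls.length
decreasing_by
  simpa using Nat.lt_succ_of_le (List.length_dropWhile_le _ _)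

-- ===== PRECONDITION & SPEC =====
def Spec_convert_io_to_bio_labels (old_labels : List String) (out : List String) : Prop := out = convert_io_to_bio_labels_alt old_labels
instance (old_labels : List String) (out : List String) : Decidable (Spec_convert_io_to_bio_labels old_labels out) := by unfold Spec_convert_io_to_bio_labels; infer_instance

-- ===== CLAIM (what is proved, stated in full; the proofs are below) =====
def Claim_equal_convert_io_to_bio_labels : Prop := ∀ (old_labels : List String), Dom_convert_io_to_bio_labels old_labels → Spec_convert_io_to_bio_labels old_labels (convert_io_to_bio_labels old_labels)

-- ===== LEMMAS AND PROOFS =====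

/-- Reference recursion: one token per element, carrying the previous label. -/
def pvGo : Option String → List String → List String
  | _, [] => []
  | prev, l :: ls =>
      (if l = "O" then "O" else if prev = some l then "I-" ++ l else "B-" ++ l) :: pvGo (some l) ls

theorem pvA_aux (full : List String) :
    ∀ (suf pre acc : List String), full = pre ++ suf →
      (PySem.List.enumerate suf (pre.length : Int)).foldl
        (fun new_labels il =>
          let i := il.1
          let label := il.2
          if label = "O" then new_labels ++ ["O"]
          else if 0 < i ∧ PySem.List.pyGet? full (i - 1) = some label then
            new_labels ++ ["I-" ++ label]
          else new_labels ++ ["B-" ++ label]) acc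
      = acc ++ pvGo pre.getLast? suf := by
  intro suf
  induction suf with
  | nil => intro pre acc _; simp [pvGo, PySem.List.enumerate]
  | cons x xs ih =>
    intro pre acc hfull
    have hcond : (0 < (pre.length : Int) ∧
        PySem.List.pyGet? full ((pre.length : Int) - 1) = some x) ↔ pre.getLast? = some x := by
      rcases pre.eq_nil_or_concat with rfl | ⟨p, a, rfl⟩
      · simp
      · simp only [List.concat_eq_append] at hfull ⊢
        have hlen : (((p ++ [a]).length : Int)) - 1 = ((p.length : Nat) : Int) := by
          simp
        rw [hlen, PySem.List.pyGet?_natCast, hfull]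
        constructor
        · rintro ⟨-, h⟩
          simpa [List.getElem?_append, List.getElem?_concat_length] using h
        · intro h
          refine ⟨by simp, ?_⟩
          simpa [List.getElem?_append, List.getElem?_concat_length] using h
    rw [PySem.List.enumerate_cons, List.foldl_cons]
    have hstep : (let i := ((pre.length : Int), x).1
          let label := ((pre.length : Int), x).2
          if label = "O" then acc ++ ["O"]
          else if 0 < i ∧ PySem.List.pyGet? full (i - 1) = some label then
            acc ++ ["I-" ++ label]
          else acc ++ ["B-" ++ label])
        = acc ++ [if x = "O" then "O" else if pre.getLast? = some x then "I-" ++ x else "B-" ++ x] := by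
      dsimp only
      by_cases hO : x = "O"
      · simp [hO]
      · by_cases hc : (0 < (pre.length : Int) ∧
            PySem.List.pyGet? full ((pre.length : Int) - 1) = some x)
        · simp only [if_neg hO, if_pos hc, if_pos (hcond.mp hc)]
        · simp only [if_neg hO, if_neg hc, if_neg (fun h => hc (hcond.mpr h))]
    rw [hstep]
    have hrec := ih (pre ++ [x])
      (acc ++ [if x = "O" then "O" else if pre.getLast? = some x then "I-" ++ x else "B-" ++ x])
      (by simpa using hfull)
    have hlen2 : (((pre ++ [x]).length : Nat) : Int) = (pre.length : Int) + 1 := by simp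
    rw [hlen2] at hrec
    rw [hrec]
    simp [pvGo]

theorem pvA_eq_go (old_labels : List String) :
    convert_io_to_bio_labels old_labels = pvGo none old_labels := by
  have := pvA_aux old_labels old_labels [] [] rfl
  simpa [convert_io_to_bio_labels] using this

theorem pvGo_run (x : String) : ∀ (xs : List String),
    pvGo (some x) xs =
      List.replicate (xs.takeWhile (fun y => y = x)).length
        (if x = "O" then "O" else "I-" ++ x)
      ++ pvGo none (xs.dropWhile (fun y => y = x)) := by
  intro xs
  induction xs with
  | nil => simp [pvGo]
  | cons y ys ih =>
    by_cases h : y = x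
    · subst h
      simp only [List.takeWhile_cons, List.dropWhile_cons, decide_true]
      simp only [pvGo]
      rw [ih]
      by_cases hO : y = "O" <;> simp [hO, List.replicate_succ]
    · have hd : (decide (y = x)) = false := by simp [h]
      simp only [List.takeWhile_cons, List.dropWhile_cons, hd]
      simp only [pvGo, List.length_nil, List.replicate_zero, List.nil_append,
        Bool.false_eq_true, if_false]
      have : (some x = some y) = False := by simp [Ne.symm h]
      by_cases hO : y = "O" <;> simp [hO, Ne.symm h]

theorem pvB_eq_go : ∀ (ls : List String),
    convert_io_to_bio_labels_alt ls = pvGo none ls := by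
  intro ls
  induction hn : ls.length using Nat.strong_induction_on generalizing ls with
  | _ n ih =>
    match ls, hn with
    | [], _ => simp [convert_io_to_bio_labels_alt, pvGo]
    | x :: xs, hn =>
      rw [convert_io_to_bio_labels_alt]
      have hrec := ih (xs.dropWhile (fun y => y = x)).length
        (by rw [← hn]; simpa using Nat.lt_succ_of_le (List.length_dropWhile_le _ xs))
        (xs.dropWhile (fun y => y = x)) rfl
      rw [hrec]
      show _ = pvGo none (x :: xs)
      simp only [pvGo]
      rw [pvGo_run x xs]
      by_cases hO : x = "O"
      · simp [hO, List.replicate_succ]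
      · simp [hO]

-- ===== VERDICT (by name: the statement is the Claim_ definition above) =====
theorem convert_io_to_bio_labels_spec : Claim_equal_convert_io_to_bio_labels := by
  intro old_labels _
  unfold Spec_convert_io_to_bio_labels
  rw [pvA_eq_go, pvB_eq_go]
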